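-- pv_equiv track=rewrite | github.com/Alessioryan/Phonotactics-N-Gram | MOP_Independent_Components.py | separate_on_vowels
-- ===== SOURCE A (Python) =====
-- vowels = {'a', 'e', 'i', 'o', 'u', 'y'}
--
-- def separate_on_vowels(word):
--     # Odd indices are C, even are V
--     c_v_segments = []
--     for letter in word:
--         if letter in vowels:
--             # VOWELS
--             # If last one is a vowel, add null consonant
--             if len(c_v_segments) % 2 == 0:
--                 c_v_segments.append("")
--             c_v_segments.append(letter)
--         else:
--             # CONSONANTS
--             # If last one is a vowel, add the consonant
--             if len(c_v_segments) % 2 == 0: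
--                 c_v_segments.append(letter)
--             else:
--                 c_v_segments[-1] = c_v_segments[-1] + letter
--     # Must check to see if last part is a vowel, if it is, add a ""
--     if c_v_segments[-1] in vowels:
--         c_v_segments.append("")
--     return c_v_segments
-- ===== SOURCE B (Python) =====
-- vowels = {'a', 'e', 'i', 'o', 'u', 'y'}
--
-- def separate_on_vowels(word):
--     # Accumulate the pending consonant cluster; flush it before each vowel.
--     segments = []
--     cluster = ""
--     for letter in word:
--         if letter in vowels:
--             segments.append(cluster)
--             segments.append(letter)
--             cluster = ""
--         else:
--             cluster += letter
--     if cluster: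
--         segments.append(cluster)
--     if segments[-1] in vowels:
--         segments.append("")
--     return segments
-- ===== Notes on version B (the rewrite author's own statement) =====
-- stated objective: simpler
-- what changed: B keeps a pending consonant-cluster string and flushes it before each vowel (and once after the loop), replacing A's parity-of-list-length bookkeeping and in-place mutation of the last list element.
import Mathlib
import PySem

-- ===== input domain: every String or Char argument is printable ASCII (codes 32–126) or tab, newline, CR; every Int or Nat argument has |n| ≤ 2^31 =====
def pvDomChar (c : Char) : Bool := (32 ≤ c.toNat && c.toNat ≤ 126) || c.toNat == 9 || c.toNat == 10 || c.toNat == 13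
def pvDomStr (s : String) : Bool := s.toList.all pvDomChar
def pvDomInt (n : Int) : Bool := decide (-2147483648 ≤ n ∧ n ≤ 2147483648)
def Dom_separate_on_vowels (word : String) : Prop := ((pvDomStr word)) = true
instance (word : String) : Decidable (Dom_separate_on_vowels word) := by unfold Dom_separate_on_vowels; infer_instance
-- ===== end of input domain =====

-- B replaces A's parity-of-list-length bookkeeping with a pending consonant-cluster
-- accumulator flushed before each vowel (simpler decomposition, same O(n) cost).


-- ===== PORT A =====
-- vowels = {'a','e','i','o','u','y'} : a Python set of 1-char strings
def pvVowels : PySem.Set String := PySem.Set.ofList ["a", "e", "i", "o", "u", "y"]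

-- one loop iteration of A; `letter in vowels` tests the 1-char string String.ofList [c]
def sepA_step (segs : List String) (c : Char) : List String :=
  if String.ofList [c] ∈ pvVowels then
    (if segs.length % 2 == 0 then segs ++ [""] else segs) ++ [String.ofList [c]]
  else
    if segs.length % 2 == 0 then segs ++ [String.ofList [c]]
    else
      -- c_v_segments[-1] = c_v_segments[-1] + letter : index -1 on a list that is
      -- nonempty in this branch (odd length), so dropLast/getLastD is exact here
      segs.dropLast ++ [segs.getLastD "" ++ String.ofList [c]]

def separate_on_vowels (word : String) : List String :=
  let segs := word.toList.foldl sepA_step []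
  match PySem.List.pyGet? segs (-1) with
  | some s => if s ∈ pvVowels then segs ++ [""] else segs
  | none => segs  -- Python raises IndexError here (empty word); excluded by Pre_

-- ===== PORT B =====
-- one loop iteration of B over (segments, cluster)
def sepB_step (st : List String × String) (c : Char) : List String × String :=
  if String.ofList [c] ∈ pvVowels then (st.1 ++ [st.2, String.ofList [c]], "")
  else (st.1, st.2 ++ String.ofList [c])

def separate_on_vowels_alt (word : String) : List String :=
  let st := word.toList.foldl sepB_step ([], "")
  let segs := if st.2 ≠ "" then st.1 ++ [st.2] else st.1
  match PySem.List.pyGet? segs (-1) with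
  | some s => if s ∈ pvVowels then segs ++ [""] else segs
  | none => segs  -- Python raises IndexError here (empty word); excluded by Pre_

-- ===== PRECONDITION & SPEC =====
-- Pre_ excludes only the empty word, on which both Pythons raise IndexError
def Pre_separate_on_vowels (word : String) : Prop := word ≠ ""
instance (word : String) : Decidable (Pre_separate_on_vowels word) := by
  unfold Pre_separate_on_vowels; infer_instance
def pvWitness_separate_on_vowels : String := "strya"

def Spec_separate_on_vowels (word : String) (out : List String) : Prop := out = separate_on_vowels_alt word
instance (word : String) (out : List String) : Decidable (Spec_separate_on_vowels word out) := by unfold Spec_separate_on_vowels; infer_instance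

-- ===== CLAIM (what is proved, stated in full; the proofs are below) =====
def Claim_equal_separate_on_vowels : Prop := ∀ (word : String), Dom_separate_on_vowels word → Pre_separate_on_vowels word → Spec_separate_on_vowels word (separate_on_vowels word)

-- ===== LEMMAS AND PROOFS =====

theorem str_append_char_ne_empty (s : String) (c : Char) : s ++ String.ofList [c] ≠ "" := by
  intro h
  have := congrArg String.length h
  simp at this

-- loop invariant: A's list equals B's segments with the pending cluster appended
theorem sep_loop_inv (cs : List Char) (sa sb : List String) (cl : String)
    (h1 : sa = if cl = "" then sb else sb ++ [cl])
    (h2 : sa.length % 2 = if cl = "" then 0 else 1) :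
    cs.foldl sepA_step sa =
      (if (cs.foldl sepB_step (sb, cl)).2 ≠ "" then
        (cs.foldl sepB_step (sb, cl)).1 ++ [(cs.foldl sepB_step (sb, cl)).2]
       else (cs.foldl sepB_step (sb, cl)).1) := by
  induction cs generalizing sa sb cl with
  | nil =>
    by_cases hcl : cl = "" <;> simp [hcl] at h1 ⊢ <;> simp [h1]
  | cons c cs ih =>
    simp only [List.foldl_cons]
    by_cases hcl : cl = ""
    · subst hcl
      rw [if_pos rfl] at h1 h2
      subst h1
      by_cases hv : String.ofList [c] ∈ pvVowels
      · have ha : sepA_step sa c = (sa ++ [""]) ++ [String.ofList [c]] := by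
          simp [sepA_step, hv, h2]
        have hb : sepB_step (sa, "") c = (sa ++ ["", String.ofList [c]], "") := by
          simp [sepB_step, hv]
        rw [ha, hb]
        exact ih _ _ "" (by simp) (by simp; omega)
      · have ha : sepA_step sa c = sa ++ [String.ofList [c]] := by
          simp [sepA_step, hv, h2]
        have hb : sepB_step (sa, "") c = (sa, "" ++ String.ofList [c]) := by
          simp [sepB_step, hv]
        rw [ha, hb]
        exact ih _ _ ("" ++ String.ofList [c])
          (by simp) (by simp; omega)
    · rw [if_neg hcl] at h1 h2
      subst h1
      have hparity : ((sb ++ [cl]).length % 2 == 0) = false := by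
        simp at h2 ⊢; omega
      by_cases hv : String.ofList [c] ∈ pvVowels
      · have ha : sepA_step (sb ++ [cl]) c = (sb ++ [cl]) ++ [String.ofList [c]] := by
          simp only [sepA_step, if_pos hv, hparity, Bool.false_eq_true]
          simp
        have hb : sepB_step (sb, cl) c = (sb ++ [cl, String.ofList [c]], "") := by
          simp [sepB_step, hv]
        rw [ha, hb]
        refine ih _ _ "" (by simp) ?_
        simp at h2 ⊢
        omega
      · have ha : sepA_step (sb ++ [cl]) c = sb ++ [cl ++ String.ofList [c]] := by
          simp only [sepA_step, if_neg hv, hparity, Bool.false_eq_true]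
          simp
        have hb : sepB_step (sb, cl) c = (sb, cl ++ String.ofList [c]) := by
          simp [sepB_step, hv]
        rw [ha, hb]
        refine ih _ _ (cl ++ String.ofList [c])
          (by simp [str_append_char_ne_empty _ c]) ?_
        simp [str_append_char_ne_empty _ c]
        simp at h2
        omega

-- ===== VERDICT (by name: the statement is the Claim_ definition above) =====
theorem separate_on_vowels_spec : Claim_equal_separate_on_vowels := by
  intro word _ _
  unfold Spec_separate_on_vowels separate_on_vowels separate_on_vowels_alt
  rw [sep_loop_inv word.toList [] [] "" (by simp) (by simp)]
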